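-- pv_equiv track=rewrite | github.com/robotnumber3/all_scales | all_scales.py | get_note_names
-- ===== SOURCE A (Python) =====
-- NOTE_NAMES = ['C', 'Db', 'D', 'Eb', 'E', 'F', 'Gb', 'G', 'Ab', 'A', 'Bb', 'B']
--
-- def get_note_names(scale, starting_note):
--     """
--     Translates the numeric interval string into note names.
--
--     Parameters:
--     - scale: The numeric interval string representing the scale
--     - starting_note: The starting note of the scale
--
--     Returns:
--     - A string representing the scale with note names
--     """
--     scale_string = ''
--
--     try:
--         note_index = NOTE_NAMES.index(starting_note)
--     except ValueError:
--         note_index = 0  # Default to C if starting_note is not found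
--
--     cur_degree = note_index
--     scale_string += NOTE_NAMES[cur_degree] + ' '
--
--     for interval in scale:
--         cur_degree = (cur_degree + int(interval)) % 12
--         scale_string += NOTE_NAMES[cur_degree] + '  '
--
--     return scale_string
-- ===== SOURCE B (Python) =====
-- NOTE_NAMES = ['C', 'Db', 'D', 'Eb', 'E', 'F', 'Gb', 'G', 'Ab', 'A', 'Bb', 'B']
-- INDEX_OF = {name: i for i, name in enumerate(NOTE_NAMES)}
--
--
-- def get_note_names(scale, starting_note):
--     # Work in a table ROTATED so the starting note sits at position 0: the note
--     # reached after the first i intervals is rotated[sum(steps[:i+1]) % 12] --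
--     # no running degree accumulator is carried at all, each position is a
--     # closed-form prefix sum into the rotated table.
--     start = INDEX_OF.get(starting_note, 0)
--     rotated = NOTE_NAMES[start:] + NOTE_NAMES[:start]
--     steps = [int(ch) for ch in scale]
--     return rotated[0] + ' ' + ''.join(
--         rotated[sum(steps[:i + 1]) % 12] + '  ' for i in range(len(steps)))
-- ===== Notes on version B (the rewrite author's own statement) =====
-- stated objective: alternative
-- what changed: A carries a running degree accumulator mod 12 and builds the string inside the same loop; B carries no running degree at all: it rotates the note table so the start sits at index 0 (start found via a precomputed name-to-index dict), computes each position as a closed-form prefix sum sum(steps[:i+1]) % 12 into the rotated table, and joins the formatted names in a separate pass.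
import Mathlib
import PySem

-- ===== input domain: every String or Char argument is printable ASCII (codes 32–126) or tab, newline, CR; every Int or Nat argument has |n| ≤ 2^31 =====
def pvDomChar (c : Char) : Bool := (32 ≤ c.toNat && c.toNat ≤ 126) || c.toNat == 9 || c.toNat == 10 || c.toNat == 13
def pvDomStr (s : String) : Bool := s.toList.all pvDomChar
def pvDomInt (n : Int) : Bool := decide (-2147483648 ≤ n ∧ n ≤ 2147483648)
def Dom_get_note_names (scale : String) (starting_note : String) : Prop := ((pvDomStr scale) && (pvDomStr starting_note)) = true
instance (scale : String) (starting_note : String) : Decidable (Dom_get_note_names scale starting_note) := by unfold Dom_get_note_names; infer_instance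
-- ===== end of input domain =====

-- B replaces A's running degree accumulator by a rotated note table indexed with
-- closed-form prefix sums, start looked up in a precomputed dict; objective:
-- alternative decomposition, same result.

-- NOTE_NAMES
def noteNames : List String := ["C", "Db", "D", "Eb", "E", "F", "Gb", "G", "Ab", "A", "Bb", "B"]

-- ===== PORT A =====
def get_note_names (scale : String) (starting_note : String) : String :=
  -- try: NOTE_NAMES.index(starting_note) except ValueError: note_index = 0
  let note_index : Int :=
    match PySem.List.index? noteNames starting_note with
    | some i => (i : Int)
    | none => 0
  -- scale_string = '' + NOTE_NAMES[cur_degree] + ' '  (index provably in [0,12), so getD is exact)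
  let scale_string : String := ((PySem.List.pyGet? noteNames note_index).getD "") ++ " "
  -- for interval in scale: cur_degree = (cur_degree + int(interval)) % 12; scale_string += NOTE_NAMES[cur_degree] + '  '
  -- (int(interval) with a non-digit char raises ValueError: none, excluded by Pre_; getD is exact on Pre_)
  (scale.toList.foldl
    (fun (st : Int × String) interval =>
      let cur := PySem.Int.mod (st.1 + (PySem.Int.ofChars? [interval]).getD 0) 12
      (cur, st.2 ++ ((PySem.List.pyGet? noteNames cur).getD "") ++ "  "))
    (note_index, scale_string)).2

-- ===== PORT B =====
-- INDEX_OF = {name: i for i, name in enumerate(NOTE_NAMES)}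
def indexOf : PySem.Dict String Int :=
  PySem.Dict.ofList ((PySem.List.enumerate noteNames 0).map (fun p => (p.2, p.1)))

def get_note_names_alt (scale : String) (starting_note : String) : String :=
  -- start = INDEX_OF.get(starting_note, 0)
  let start : Int := PySem.Dict.getD indexOf starting_note 0
  -- rotated = NOTE_NAMES[start:] + NOTE_NAMES[:start]
  let rotated : List String :=
    PySem.List.slice noteNames (some start) none ++ PySem.List.slice noteNames none (some start)
  -- steps = [int(ch) for ch in scale]  (non-digit: ValueError, excluded by Pre_)
  let steps : List Int := scale.toList.map (fun ch => (PySem.Int.ofChars? [ch]).getD 0)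
  -- rotated[0] + ' ' + ''.join(rotated[sum(steps[:i+1]) % 12] + '  ' for i in range(len(steps)))
  ((PySem.List.pyGet? rotated 0).getD "") ++ " " ++
    PySem.Str.join ""
      ((PySem.List.pyRange 0 (steps.length : Int) 1).map
        (fun i =>
          ((PySem.List.pyGet? rotated
              (PySem.Int.mod (PySem.List.slice steps none (some (i + 1))).sum 12)).getD "")
            ++ "  "))

-- ===== PRECONDITION & SPEC =====
-- Pre_ excludes exactly the scales containing a non-digit character, on which A's
-- int(interval) raises ValueError (B's int(ch) raises there too).
def Pre_get_note_names (scale : String) (_starting_note : String) : Prop :=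
  scale.toList.all Char.isDigit = true
instance (scale : String) (starting_note : String) : Decidable (Pre_get_note_names scale starting_note) := by unfold Pre_get_note_names; infer_instance

def pvWitness_get_note_names : String × String := ("2212221", "D")

def Spec_get_note_names (scale : String) (starting_note : String) (out : String) : Prop := out = get_note_names_alt scale starting_note
instance (scale : String) (starting_note : String) (out : String) : Decidable (Spec_get_note_names scale starting_note out) := by unfold Spec_get_note_names; infer_instance

-- ===== CLAIM (what is proved, stated in full; the proofs are below) =====
def Claim_equal_get_note_names : Prop := ∀ (scale : String) (starting_note : String), Dom_get_note_names scale starting_note → Pre_get_note_names scale starting_note → Spec_get_note_names scale starting_note (get_note_names scale starting_note)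

-- ===== LEMMAS AND PROOFS =====

-- int(ch) (with the ports' getD 0 totalisation)
def pvK (c : Char) : Int := (PySem.Int.ofChars? [c]).getD 0
-- the rotated table of B, as a function of the start index
def pvRot (st : Int) : List String :=
  PySem.List.slice noteNames (some st) none ++ PySem.List.slice noteNames none (some st)
-- one formatted note at ABSOLUTE degree T (reduced mod 12 when indexing)
def pvFmt (T : Int) : String := ((PySem.List.pyGet? noteNames (PySem.Int.mod T 12)).getD "") ++ "  "
-- the common normal form: notes of the successive absolute prefix totals
def pvG : List Int → Int → String
  | [], _ => ""
  | k :: ks, t => pvFmt (t + k) ++ pvG ks (t + k)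
-- A's loop body
def pvStepA (st : Int × String) (c : Char) : Int × String :=
  let cur := PySem.Int.mod (st.1 + pvK c) 12
  (cur, st.2 ++ ((PySem.List.pyGet? noteNames cur).getD "") ++ "  ")

lemma start_bounds (sn : String) :
    0 ≤ PySem.Dict.getD indexOf sn 0 ∧ PySem.Dict.getD indexOf sn 0 < 12 := by
  simp [indexOf, noteNames, PySem.Dict.ofList, PySem.Dict.getD, PySem.Dict.get?, PySem.List.enumerate,
    PySem.Dict.update, PySem.Dict.insert, PySem.Dict.contains, PySem.Dict.empty, List.find?_cons]
  repeat' split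
  all_goals norm_num

-- A's try/except NOTE_NAMES.index = B's INDEX_OF.get(sn, 0)
def pvStart (sn : String) : Int :=
  match PySem.List.index? noteNames sn with | some i => (i : Int) | none => 0

lemma pvStart_eq (sn : String) : pvStart sn = PySem.Dict.getD indexOf sn 0 := by
  by_cases h1 : sn = "C"; · subst h1; decide
  by_cases h2 : sn = "Db"; · subst h2; decide
  by_cases h3 : sn = "D"; · subst h3; decide
  by_cases h4 : sn = "Eb"; · subst h4; decide
  by_cases h5 : sn = "E"; · subst h5; decide
  by_cases h6 : sn = "F"; · subst h6; decide
  by_cases h7 : sn = "Gb"; · subst h7; decide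
  by_cases h8 : sn = "G"; · subst h8; decide
  by_cases h9 : sn = "Ab"; · subst h9; decide
  by_cases h10 : sn = "A"; · subst h10; decide
  by_cases h11 : sn = "Bb"; · subst h11; decide
  by_cases h12 : sn = "B"; · subst h12; decide
  have hni : sn ∉ noteNames := by
    simp only [noteNames, List.mem_cons, List.not_mem_nil, or_false]
    push Not
    exact ⟨h1, h2, h3, h4, h5, h6, h7, h8, h9, h10, h11, h12⟩
  have h0 : PySem.List.index? noteNames sn = none :=
    (PySem.List.index?_eq_none_iff noteNames sn).mpr hni
  have hc : PySem.Dict.getD indexOf sn 0 = 0 := by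
    apply PySem.Dict.getD_of_not_contains
    simp [indexOf, noteNames, PySem.Dict.ofList, PySem.Dict.update, PySem.Dict.insert,
      PySem.Dict.contains, PySem.Dict.empty, PySem.List.enumerate]
    exact ⟨fun h => h1 h.symm, fun h => h2 h.symm, fun h => h3 h.symm, fun h => h4 h.symm,
      fun h => h5 h.symm, fun h => h6 h.symm, fun h => h7 h.symm, fun h => h8 h.symm,
      fun h => h9 h.symm, fun h => h10 h.symm, fun h => h11 h.symm, fun h => h12 h.symm⟩
  unfold pvStart
  rw [h0, hc]

-- indexing the rotated table = indexing NOTE_NAMES at the shifted degree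
lemma rot_get (st j : Int) (hst : 0 ≤ st ∧ st < 12) (hj : 0 ≤ j ∧ j < 12) :
    PySem.List.pyGet? (pvRot st) j = PySem.List.pyGet? noteNames (PySem.Int.mod (st + j) 12) := by
  obtain ⟨h1, h2⟩ := hst; obtain ⟨h3, h4⟩ := hj
  interval_cases st <;> interval_cases j <;> decide

-- residues: adding a reduced residue is adding the raw total
lemma mod_shift (t k : Int) :
    PySem.Int.mod (PySem.Int.mod t 12 + k) 12 = PySem.Int.mod (t + k) 12 := by
  rw [PySem.Int.mod_eq_emod_of_pos (by norm_num), PySem.Int.mod_eq_emod_of_pos (by norm_num),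
    PySem.Int.mod_eq_emod_of_pos (by norm_num)]
  omega

lemma mod_shift' (t k : Int) :
    PySem.Int.mod (k + PySem.Int.mod t 12) 12 = PySem.Int.mod (k + t) 12 := by
  rw [PySem.Int.mod_eq_emod_of_pos (by norm_num), PySem.Int.mod_eq_emod_of_pos (by norm_num),
    PySem.Int.mod_eq_emod_of_pos (by norm_num)]
  omega

-- A's interleaved loop produces the normal form
lemma A_loop (cs : List Char) : ∀ (t a : Int) (s : String), a = PySem.Int.mod t 12 →
    (cs.foldl pvStepA (a, s)).2 = s ++ pvG (cs.map pvK) t := by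
  induction cs with
  | nil => intro t a s _; simp [pvG]
  | cons c cs ih =>
    intro t a s ha
    simp only [List.foldl_cons, List.map_cons, pvG, pvStepA]
    rw [show PySem.Int.mod (a + pvK c) 12 = PySem.Int.mod (t + pvK c) 12 by
      rw [ha, mod_shift]]
    rw [ih (t + pvK c) _ _ rfl]
    simp [pvFmt, String.append_assoc]

-- ''.join with empty separator distributes over cons/append
lemma join_empty_cons (x : String) (l : List String) :
    PySem.Str.join "" (x :: l) = x ++ PySem.Str.join "" l := by
  cases l with
  | nil => simp [PySem.Str.join, PySem.Chars.join, List.intercalate]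
  | cons y ys => simp [PySem.Str.join, PySem.Chars.join_cons_cons]

lemma join_empty_append (l1 l2 : List String) :
    PySem.Str.join "" (l1 ++ l2) = PySem.Str.join "" l1 ++ PySem.Str.join "" l2 := by
  induction l1 with
  | nil => simp [PySem.Str.join, PySem.Chars.join_nil]
  | cons x l1 ih =>
    rw [List.cons_append, join_empty_cons, join_empty_cons, ih, String.append_assoc]

lemma join_empty_singleton (x : String) : PySem.Str.join "" [x] = x := by
  simp [PySem.Str.join, PySem.Chars.join, List.intercalate]

-- the normal form grows at the back with the full prefix total
lemma pvG_append (ys : List Int) : ∀ (k t : Int),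
    pvG (ys ++ [k]) t = pvG ys t ++ pvFmt (t + (ys.sum + k)) := by
  induction ys with
  | nil => intro k t; simp [pvG]
  | cons y ys ih =>
    intro k t
    simp only [List.cons_append, pvG, ih, List.sum_cons, String.append_assoc]
    ring_nf

-- B's prefix-sum formatting pass produces the same normal form
lemma B_fmt (st : Int) (h1 : 0 ≤ st) (h2 : st < 12) : ∀ (ks : List Int),
    PySem.Str.join ""
      ((PySem.List.pyRange 0 (ks.length : Int) 1).map
        (fun i =>
          ((PySem.List.pyGet? (pvRot st)
              (PySem.Int.mod (PySem.List.slice ks none (some (i + 1))).sum 12)).getD "")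
            ++ "  ")) = pvG ks st := by
  intro ks
  induction ks using List.reverseRecOn with
  | nil => simp [PySem.List.pyRange_one_eq_nil, pvG, PySem.Str.join, PySem.Chars.join_nil]
  | append_singleton ys k ih =>
    rw [show (((ys ++ [k]).length : Nat) : Int) = (ys.length : Int) + 1 by simp]
    rw [PySem.List.pyRange_one_succ_right (by positivity)]
    rw [List.map_append, join_empty_append]
    rw [List.map_congr_left (g := fun i =>
        ((PySem.List.pyGet? (pvRot st)
            (PySem.Int.mod (PySem.List.slice ys none (some (i + 1))).sum 12)).getD "")
          ++ "  ")
      (by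
        intro i hi
        rw [PySem.List.mem_pyRange_one] at hi
        simp only []
        rw [PySem.List.slice_to (ys ++ [k]) (b := i + 1) (by omega),
          PySem.List.slice_to ys (b := i + 1) (by omega),
          List.take_append_of_le_length (by omega)])]
    rw [ih]
    simp only [List.map_singleton, join_empty_singleton]
    rw [show PySem.List.slice (ys ++ [k]) none (some ((ys.length : Int) + 1)) = ys ++ [k] by
      rw [PySem.List.slice_to (ys ++ [k]) (b := (ys.length : Int) + 1) (by positivity)]
      apply List.take_of_length_le
      simp]
    rw [rot_get st _ ⟨h1, h2⟩
      ⟨PySem.Int.mod_nonneg _ (by norm_num), PySem.Int.mod_lt _ (by norm_num)⟩]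
    rw [mod_shift']
    rw [pvG_append]
    have : (ys ++ [k]).sum = ys.sum + k := by simp
    rw [this]
    rfl

-- ===== VERDICT (by name: the statement is the Claim_ definition above) =====
theorem get_note_names_spec : Claim_equal_get_note_names := by
  intro scale starting_note _ _
  unfold Spec_get_note_names
  have hb := start_bounds starting_note
  have hs := pvStart_eq starting_note
  have hA : get_note_names scale starting_note =
      (((PySem.List.pyGet? noteNames (pvStart starting_note)).getD "") ++ " ")
        ++ pvG (scale.toList.map pvK) (pvStart starting_note) := by
    exact A_loop scale.toList (pvStart starting_note) (pvStart starting_note) _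
      (by rw [hs, PySem.Int.mod_eq_emod_of_pos (by norm_num)]; omega)
  have hB : get_note_names_alt scale starting_note =
      (((PySem.List.pyGet? (pvRot (PySem.Dict.getD indexOf starting_note 0)) 0).getD "") ++ " ")
        ++ pvG (scale.toList.map pvK) (PySem.Dict.getD indexOf starting_note 0) := by
    show ((PySem.List.pyGet? (pvRot (PySem.Dict.getD indexOf starting_note 0)) 0).getD "") ++ " " ++
        PySem.Str.join ""
          ((PySem.List.pyRange 0 (((scale.toList.map pvK).length : Nat) : Int) 1).map
            (fun i =>
              ((PySem.List.pyGet? (pvRot (PySem.Dict.getD indexOf starting_note 0))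
                  (PySem.Int.mod
                    (PySem.List.slice (scale.toList.map pvK) none (some (i + 1))).sum 12)).getD "")
                ++ "  ")) = _
    rw [B_fmt _ hb.1 hb.2, String.append_assoc]
  rw [hA, hB, hs]
  rw [rot_get _ 0 ⟨hb.1, hb.2⟩ (by norm_num)]
  rw [show PySem.Int.mod (PySem.Dict.getD indexOf starting_note 0 + 0) 12
      = PySem.Dict.getD indexOf starting_note 0 by
    rw [PySem.Int.mod_eq_emod_of_pos (by norm_num)]; omega]
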